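-- pv_equiv track=rewrite | github.com/aayushgote03/LOOP-TESTER-IN-PYTHON | clooprunner.py | find_3d_loop_nest
-- ===== SOURCE A (Python) =====
-- def find_3d_loop_nest(code_lines, nest_number=1):
--     """
--     Find the start and end of the N-th 3-level nested for-loop inside main.
--     Returns (start_idx, end_idx, loop_vars) or (None, None, None) if not found.
--     """
--     in_main = False
--     brace_depth = 0
--     loop_stack = []
--     start_idx = None
--     end_idx = None
--     loop_vars = []
--     found_nests = 0
--
--     for idx, line in enumerate(code_lines):
--         if "int main" in line:
--             in_main = True
--
--         if not in_main:
--             continue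
--
--         brace_depth += line.count("{")
--         brace_depth -= line.count("}")
--
--         stripped = line.strip()
--         if stripped.startswith("for ("):
--             var = stripped.split("for (")[1].split("=")[0].strip().split()[-1]
--             loop_stack.append((idx, var))
--             if len(loop_stack) == 1:
--                 start_idx = idx
--             if len(loop_stack) == 3:
--                 nest_brace = 0
--                 for j in range(idx, len(code_lines)):
--                     nest_brace += code_lines[j].count("{")
--                     nest_brace -= code_lines[j].count("}")
--                     if nest_brace == 0:
--                         end_idx = j
--                         break
--                 loop_vars = [v for _, v in loop_stack]
--                 found_nests += 1
--                 if found_nests == nest_number: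
--                     return start_idx, end_idx, loop_vars
--                 # Reset for next search
--                 loop_stack = []
--                 start_idx = None
--                 end_idx = None
--                 loop_vars = []
--         if brace_depth == 0 and in_main and "main" in code_lines[idx]:
--             pass
--
--     return None, None, None
-- ===== SOURCE B (Python) =====
-- def find_3d_loop_nest(code_lines, nest_number=1):
--     """
--     Same result as the original, but the balanced-brace end of each nest is
--     looked up in a table built in one backward pass over prefix
--     brace sums, instead of re-scanning the tail of the file per nest (same result, different traversal).
--     """
--     n = len(code_lines)
--     m = None
--     for i in range(n):
--         if "int main" in code_lines[i]:
--             m = i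
--             break
--     if m is None:
--         return None, None, None
--     # pref[i] = net brace count of lines [0, i)
--     pref = [0] * (n + 1)
--     for i in range(n):
--         pref[i + 1] = pref[i] + code_lines[i].count("{") - code_lines[i].count("}")
--     # nxt[i] = first j >= i with pref[j+1] == pref[i] (brace-balanced span starting at line i)
--     nxt = [None] * n
--     pos = {}
--     for i in range(n - 1, -1, -1):
--         pos[pref[i + 1]] = i
--         nxt[i] = pos.get(pref[i])
--     group = []
--     count = 0
--     for idx in range(m, n):
--         stripped = code_lines[idx].strip()
--         if stripped.startswith("for ("):
--             var = stripped.split("for (")[1].split("=")[0].strip().split()[-1]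
--             group.append((idx, var))
--             if len(group) == 3:
--                 count += 1
--                 if count == nest_number:
--                     return group[0][0], nxt[idx], [v for _, v in group]
--                 group = []
--     return None, None, None
-- ===== Notes on version B (the rewrite author's own statement) =====
-- stated objective: alternative
-- what changed: Instead of re-scanning the rest of the file for the balanced-brace end at every completed nest, B builds a prefix-brace-sum table and a first-match table in one backward pass and looks each nest's end up there; the main walk groups for-lines in threes from the first 'int main' line.
import Mathlib
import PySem

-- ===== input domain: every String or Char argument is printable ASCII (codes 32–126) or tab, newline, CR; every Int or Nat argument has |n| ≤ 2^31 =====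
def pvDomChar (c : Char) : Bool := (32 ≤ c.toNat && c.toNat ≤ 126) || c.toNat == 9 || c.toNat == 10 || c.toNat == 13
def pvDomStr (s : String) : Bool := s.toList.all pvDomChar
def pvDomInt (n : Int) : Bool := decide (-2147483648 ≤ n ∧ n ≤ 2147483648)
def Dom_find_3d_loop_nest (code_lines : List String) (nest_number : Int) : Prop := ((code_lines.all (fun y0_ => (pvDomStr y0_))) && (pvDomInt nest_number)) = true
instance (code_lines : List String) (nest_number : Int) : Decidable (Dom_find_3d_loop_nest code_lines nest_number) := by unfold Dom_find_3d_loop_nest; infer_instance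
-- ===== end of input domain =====

-- B replaces A's per-nest forward brace re-scan by a first-match table built once
-- from prefix brace sums and looked up per nest: objective = alternative.

-- net brace count of one line: line.count("{") - line.count("}")
def pvDelta (l : String) : Int :=
  (PySem.Str.count l "{" : Int) - (PySem.Str.count l "}" : Int)

-- stripped.split("for (")[1].split("=")[0].strip().split()[-1]; none exactly where Python raises IndexError
def pvParseVar (stripped : String) : Option String :=
  (PySem.Str.split? stripped "for (").bind fun parts =>
  (PySem.List.pyGet? parts 1).bind fun rest =>
  (PySem.Str.split? rest "=").bind fun ps =>
  (PySem.List.pyGet? ps 0).bind fun pre =>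
  PySem.List.pyGet? (PySem.Str.split₀ (PySem.Str.strip pre)) (-1)

-- ===== PORT A =====
-- A's inner loop: for j in range(idx, len(code_lines)): nest_brace += …; if nest_brace == 0: end_idx = j; break
def pvScanA : List String → Nat → Int → Option Int
  | [], _, _ => none
  | l :: tl, j, acc =>
    let acc' := acc + pvDelta l
    if acc' = 0 then some (j : Int) else pvScanA tl (j + 1) acc'

-- A's main loop over enumerate(code_lines); on a raising input (parse failure) the port uses "" (outside Pre_)
def pvGoA (cl : List String) (nn : Int) :
    List String → Nat → Bool → Int → List (Int × String) → Option Int → Int →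
    Option Int × Option Int × Option (List String)
  | [], _, _, _, _, _, _ => (none, none, none)
  | line :: tl, idx, inMain, bd, stack, startIdx, found =>
    let inMain' := inMain || PySem.Str.isIn "int main" line
    if inMain' = false then pvGoA cl nn tl (idx + 1) inMain' bd stack startIdx found
    else
      let bd' := bd + pvDelta line
      let stripped := PySem.Str.strip line
      if PySem.Str.startswith stripped "for (" then
        let v := (pvParseVar stripped).getD ""
        let stack' := stack ++ [((idx : Int), v)]
        let startIdx' := if stack'.length = 1 then some (idx : Int) else startIdx
        if stack'.length = 3 then
          let endIdx := pvScanA (cl.drop idx) idx 0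
          let vars := stack'.map (·.2)
          let found' := found + 1
          if found' = nn then (startIdx', endIdx, some vars)
          else pvGoA cl nn tl (idx + 1) inMain' bd' [] none found'
        else pvGoA cl nn tl (idx + 1) inMain' bd' stack' startIdx' found
      else pvGoA cl nn tl (idx + 1) inMain' bd' stack startIdx found
      -- (A's trailing 'if brace_depth == 0 … : pass' has no effect and is not ported)

def find_3d_loop_nest (code_lines : List String) (nest_number : Int) :
    Option Int × Option Int × Option (List String) :=
  pvGoA code_lines nest_number code_lines 0 false 0 [] none 0

-- ===== PORT B =====
-- Source B: first index containing "int main"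
def pvFindMain : List String → Nat → Option Nat
  | [], _ => none
  | l :: tl, i => if PySem.Str.isIn "int main" l then some i else pvFindMain tl (i + 1)

-- Source B's backward pass: pos[pref[i+1]] = i; nxt[i] = pos.get(pref[i])  (p = pref[i] on entry)
def pvGoNxt : List String → Nat → Int → List (Option Int) × PySem.Dict Int Int
  | [], _, _ => ([], PySem.Dict.empty)
  | l :: tl, i, p =>
    let p1 := p + pvDelta l
    let r := pvGoNxt tl (i + 1) p1
    let pos := r.2.insert p1 (i : Int)
    (pos.get? p :: r.1, pos)

-- Source B's grouping loop from the "int main" line onward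
def pvGoB (nxt : List (Option Int)) (nn : Int) :
    List String → Nat → List (Int × String) → Int →
    Option Int × Option Int × Option (List String)
  | [], _, _, _ => (none, none, none)
  | line :: tl, idx, group, count =>
    let stripped := PySem.Str.strip line
    if PySem.Str.startswith stripped "for (" then
      let v := (pvParseVar stripped).getD ""
      let group' := group ++ [((idx : Int), v)]
      if group'.length = 3 then
        let count' := count + 1
        if count' = nn then
          (some (PySem.List.pyGetD group' 0 (0, "")).1,
           PySem.List.pyGetD nxt (idx : Int) none,
           some (group'.map (·.2)))
        else pvGoB nxt nn tl (idx + 1) [] count'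
      else pvGoB nxt nn tl (idx + 1) group' count
    else pvGoB nxt nn tl (idx + 1) group count

def find_3d_loop_nest_alt (code_lines : List String) (nest_number : Int) :
    Option Int × Option Int × Option (List String) :=
  match pvFindMain code_lines 0 with
  | none => (none, none, none)
  | some m => pvGoB (pvGoNxt code_lines 0 0).1 nest_number (code_lines.drop m) m [] 0

-- ===== PRECONDITION & SPEC =====
-- Pre_ excludes inputs where Python raises IndexError: a line at or after the first "int main"
-- line whose stripped form starts with "for (" but whose header yields no variable token.
def Pre_find_3d_loop_nest (code_lines : List String) (nest_number : Int) : Prop :=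
  ∀ i, i < code_lines.length →
    ((∃ j, j ≤ i ∧ PySem.Str.isIn "int main" (code_lines.getD j "") = true) ∧
      PySem.Str.startswith (PySem.Str.strip (code_lines.getD i "")) "for (" = true) →
    pvParseVar (PySem.Str.strip (code_lines.getD i "")) ≠ none
instance (code_lines : List String) (nest_number : Int) : Decidable (Pre_find_3d_loop_nest code_lines nest_number) := by unfold Pre_find_3d_loop_nest; infer_instance

def pvWitness_find_3d_loop_nest : List String × Int :=
  (["int main() {", "for (int a = 0; a < 2; a++) {", "for (int b = 0; b < 2; b++) {",
    "for (int c = 0; c < 2; c++) {", "}", "}", "}", "}"], 1)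

def Spec_find_3d_loop_nest (code_lines : List String) (nest_number : Int) (out : Option Int × Option Int × Option (List String)) : Prop := out = find_3d_loop_nest_alt code_lines nest_number
instance (code_lines : List String) (nest_number : Int) (out : Option Int × Option Int × Option (List String)) : Decidable (Spec_find_3d_loop_nest code_lines nest_number out) := by unfold Spec_find_3d_loop_nest; infer_instance

-- ===== CLAIM (what is proved, stated in full; the proofs are below) =====
def Claim_equal_find_3d_loop_nest : Prop := ∀ (code_lines : List String) (nest_number : Int), Dom_find_3d_loop_nest code_lines nest_number → Pre_find_3d_loop_nest code_lines nest_number → Spec_find_3d_loop_nest code_lines nest_number (find_3d_loop_nest code_lines nest_number)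

-- ===== LEMMAS AND PROOFS =====

-- reference: first j ≥ start with running prefix (p plus the deltas so far) equal to t
def pvFirstAt : List String → Nat → Int → Int → Option Int
  | [], _, _, _ => none
  | l :: tl, j, p, t =>
    let p' := p + pvDelta l
    if p' = t then some (j : Int) else pvFirstAt tl (j + 1) p' t

theorem pvScanA_eq_firstAt (ls : List String) :
    ∀ (j : Nat) (acc p : Int), pvScanA ls j acc = pvFirstAt ls j p (p - acc) := by
  induction ls with
  | nil => intro j acc p; rfl
  | cons l tl ih =>
    intro j acc p
    simp only [pvScanA, pvFirstAt]
    by_cases h : acc + pvDelta l = 0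
    · have : p + pvDelta l = p - acc := by omega
      simp [h, this]
    · have : ¬ (p + pvDelta l = p - acc) := by omega
      simp [h, this]
      have := ih (j + 1) (acc + pvDelta l) (p + pvDelta l)
      have heq : p + pvDelta l - (acc + pvDelta l) = p - acc := by ring
      rw [heq] at this
      exact this

theorem pvGoNxt_snd_get? (ls : List String) :
    ∀ (i : Nat) (p t : Int), (pvGoNxt ls i p).2.get? t = pvFirstAt ls i p t := by
  induction ls with
  | nil => intro i p t; simp [pvGoNxt, pvFirstAt, PySem.Dict.get?_empty]
  | cons l tl ih =>
    intro i p t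
    simp only [pvGoNxt, pvFirstAt]
    rw [PySem.Dict.get?_insert]
    by_cases h : p + pvDelta l = t
    · simp [h]
    · have h' : ¬ (t = p + pvDelta l) := fun hh => h hh.symm
      simp [h, h', ih]

theorem pvGoNxt_fst_getD (ls : List String) :
    ∀ (i : Nat) (p : Int) (k : Nat), k < ls.length →
      (pvGoNxt ls i p).1.getD k none
        = pvFirstAt (ls.drop k) (i + k) (p + ((ls.take k).map pvDelta).sum)
            (p + ((ls.take k).map pvDelta).sum) := by
  induction ls with
  | nil => intro i p k hk; simp at hk
  | cons l tl ih =>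
    intro i p k hk
    match k with
    | 0 =>
      simp only [List.take_zero, List.map_nil, List.sum_nil, add_zero, List.drop_zero]
      have : (pvGoNxt (l :: tl) i p).1.getD 0 none = (pvGoNxt (l :: tl) i p).2.get? p := by
        simp [pvGoNxt]
      rw [this, pvGoNxt_snd_get?]
    | k + 1 =>
      have hk' : k < tl.length := by simpa using hk
      have step : (pvGoNxt (l :: tl) i p).1.getD (k + 1) none
          = (pvGoNxt tl (i + 1) (p + pvDelta l)).1.getD k none := by
        simp [pvGoNxt]
      rw [step, ih (i + 1) (p + pvDelta l) k hk']
      have h1 : i + 1 + k = i + (k + 1) := by omega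
      have h2 : p + pvDelta l + ((tl.take k).map pvDelta).sum
          = p + (((l :: tl).take (k + 1)).map pvDelta).sum := by
        simp [List.take_succ_cons]; ring
      rw [h1, h2]
      rfl

-- the key speed lemma: A's forward re-scan from line idx equals B's precomputed table entry
theorem pvScan_eq_nxt (cl : List String) (idx : Nat) (h : idx < cl.length) :
    pvScanA (cl.drop idx) idx 0 = (pvGoNxt cl 0 0).1.getD idx none := by
  rw [pvGoNxt_fst_getD cl 0 0 idx h]
  have := pvScanA_eq_firstAt (cl.drop idx) idx 0
      (0 + (((cl.take idx).map pvDelta).sum))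
  simpa using this

-- after "int main": A's cumulative stack walk equals B's grouping walk
theorem pvGoA_eq_pvGoB (cl : List String) (nn : Int) :
    ∀ (tl : List String) (idx : Nat) (stack : List (Int × String)) (found bd : Int),
      cl.drop idx = tl → stack.length ≤ 2 →
      pvGoA cl nn tl idx true bd stack (stack.head?.map (·.1)) found
        = pvGoB (pvGoNxt cl 0 0).1 nn tl idx stack found := by
  intro tl
  induction tl with
  | nil => intro idx stack found bd _ _; rfl
  | cons line tl' ih =>
    intro idx stack found bd hdrop hlen
    have hidx : idx < cl.length := by
      by_contra h
      have : cl.drop idx = [] := List.drop_eq_nil_of_le (by omega)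
      rw [hdrop] at this; simp at this
    have hdrop' : cl.drop (idx + 1) = tl' := by
      have h1 : List.drop 1 (List.drop idx cl) = List.drop (idx + 1) cl := List.drop_drop
      rw [hdrop] at h1
      simpa using h1.symm
    have hscan : pvScanA (cl.drop idx) idx 0
        = PySem.List.pyGetD (pvGoNxt cl 0 0).1 (idx : Int) none := by
      rw [pvScan_eq_nxt cl idx hidx]
      simp [PySem.List.pyGetD_natCast]
    by_cases hfor : PySem.Chars.startswith (PySem.Chars.strip line.toList) ['f', 'o', 'r', ' ', '('] = true
    · match stack, hlen with
      | [], _ =>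
        have hih := ih (idx + 1) [((idx : Int), (pvParseVar (PySem.Str.strip line)).getD "")]
          found (bd + pvDelta line) hdrop' (by simp)
        simp only [pvGoA, pvGoB, Bool.true_or]
        simp [hfor]
        simpa using hih
      | [a], _ =>
        have hih := ih (idx + 1) [a, ((idx : Int), (pvParseVar (PySem.Str.strip line)).getD "")]
          found (bd + pvDelta line) hdrop' (by simp)
        simp only [pvGoA, pvGoB, Bool.true_or]
        simp [hfor]
        simpa using hih
      | [a, b], _ =>
        by_cases hret : found + 1 = nn
        · simp only [pvGoA, pvGoB, Bool.true_or]
          simp [hfor, hret, hscan, PySem.List.pyGetD_zero_cons]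
        · have hih := ih (idx + 1) [] (found + 1) (bd + pvDelta line) hdrop' (by simp)
          simp only [pvGoA, pvGoB, Bool.true_or]
          simp [hfor, hret]
          simpa using hih
    · have hih := ih (idx + 1) stack found (bd + pvDelta line) hdrop' hlen
      simp only [pvGoA, pvGoB, Bool.true_or]
      simp [hfor]
      exact hih

-- before "int main": A skips lines; B locates the first main line and starts there
theorem pvGoA_premain (cl : List String) (nn : Int) :
    ∀ (tl : List String) (idx : Nat) (bd : Int),
      cl.drop idx = tl →
      pvGoA cl nn tl idx false bd [] none 0
        = (match pvFindMain tl idx with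
           | none => (none, none, none)
           | some m => pvGoB (pvGoNxt cl 0 0).1 nn (cl.drop m) m [] 0) := by
  intro tl
  induction tl with
  | nil => intro idx bd _; rfl
  | cons line tl' ih =>
    intro idx bd hdrop
    have hdrop' : cl.drop (idx + 1) = tl' := by
      have h1 : List.drop 1 (List.drop idx cl) = List.drop (idx + 1) cl := List.drop_drop
      rw [hdrop] at h1
      simpa using h1.symm
    by_cases hmain : PySem.Str.isIn "int main" line = true
    · have hmain' : PySem.Chars.isIn ['i', 'n', 't', ' ', 'm', 'a', 'i', 'n'] line.toList = true := by
        simpa using hmain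
      have hB : pvFindMain (line :: tl') idx = some idx := by simp [pvFindMain, hmain']
      rw [hB]
      have hA : pvGoA cl nn (line :: tl') idx false bd [] none 0
          = pvGoA cl nn (line :: tl') idx true bd [] none 0 := by
        simp only [pvGoA, hmain, Bool.or_true]
      rw [hA]
      show pvGoA cl nn (line :: tl') idx true bd [] none 0
          = pvGoB (pvGoNxt cl 0 0).1 nn (cl.drop idx) idx [] 0
      rw [hdrop]
      have := pvGoA_eq_pvGoB cl nn (line :: tl') idx [] 0 bd hdrop (by simp)
      simpa using this
    · have hmain' : PySem.Chars.isIn ['i', 'n', 't', ' ', 'm', 'a', 'i', 'n'] line.toList = false := by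
        simpa using hmain
      have hB : pvFindMain (line :: tl') idx = pvFindMain tl' (idx + 1) := by
        simp [pvFindMain, hmain']
      rw [hB]
      have hA : pvGoA cl nn (line :: tl') idx false bd [] none 0
          = pvGoA cl nn tl' (idx + 1) false bd [] none 0 := by
        simp [pvGoA, hmain']
      rw [hA]
      exact ih (idx + 1) bd hdrop'

-- ===== VERDICT (by name: the statement is the Claim_ definition above) =====
theorem find_3d_loop_nest_spec : Claim_equal_find_3d_loop_nest := by
  intro cl nn _ _
  unfold Spec_find_3d_loop_nest find_3d_loop_nest find_3d_loop_nest_alt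
  rw [pvGoA_premain cl nn cl 0 0 (by simp)]
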